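-- pv_equiv track=rewrite | github.com/RomanFloyd/student-life-companion | main.py | check_topic_relevance
-- ===== SOURCE A (Python) =====
-- def check_topic_relevance(query: str, matched_item: dict) -> bool:
--     """
--     Check if matched question is actually relevant to the query.
--
--     Args:
--         query: User's query
--         matched_item: Matched knowledge base item
--
--     Returns:
--         True if relevant, False otherwise
--     """
--     query_lower = query.lower()
--     question_lower = matched_item.get("question", "").lower()
--     answer_lower = matched_item.get("answer", "").lower()
--     topic = matched_item.get("topic", "")
--
--     # Extract key nouns from query (simple approach)
--     query_words = set(query_lower.split())
--     question_words = set(question_lower.split())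
--
--     # Check for non-KB query patterns (recommendations, jokes, weather, etc.)
--     non_kb_keywords = {'best', 'top', 'recommend', 'suggestion', 'joke', 'funny', 'weather', 'forecast', 'temperature', 'climate'}
--     if query_words & non_kb_keywords:
--         return False  # These should go to Groq AI
--
--     # Remove common words
--     stop_words = {'how', 'to', 'what', 'where', 'when', 'why', 'is', 'are', 'the', 'a', 'an', 'in', 'on', 'at', 'for', 'with', 'about', 'tell', 'me', 'can', 'i', 'do', 'does', 'spain', 'spanish', 'barcelona'}
--     query_keywords = query_words - stop_words
--     question_keywords = question_words - stop_words
--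
--     # Check if at least one meaningful keyword matches (excluding generic location words)
--     common_keywords = query_keywords & question_keywords
--
--     # If no common keywords, probably not relevant
--     if len(common_keywords) == 0:
--         return False
--
--     # If only "spanish" or "barcelona" matches, not relevant enough
--     if common_keywords <= {'spanish', 'barcelona', 'spain'}:
--         return False
--
--     # Check topic relevance
--     topic_keywords = {
--         'visa': {'visa', 'tie', 'residence', 'permit', 'immigration', 'extranjeria'},
--         'work': {'work', 'job', 'employment', 'internship', 'salary'},
--         'housing': {'housing', 'apartment', 'flat', 'rent', 'empadronamiento', 'landlord'},
--         'transport': {'transport', 'metro', 'bus', 'train', 'tjove', 'ticket'},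
--         'mobile': {'mobile', 'phone', 'sim', 'esim', 'vodafone', 'movistar'},
--         'university': {'programming', 'coding', 'computer', 'science', 'capstone', 'module', 'exam', 'grade', 'professor'},
--         'life': {'language', 'school', 'course', 'food', 'restaurant', 'beach', 'discount', 'fish', 'seafood'}
--     }
--
--     # If query has specific topic keywords but matched different topic, reject
--     for topic_name, keywords in topic_keywords.items():
--         if query_keywords & keywords and topic != topic_name:
--             return False
--
--     return True
-- ===== SOURCE B (Python) =====
-- def check_topic_relevance(query: str, matched_item: dict) -> bool:
--     non_kb_keywords = {'best', 'top', 'recommend', 'suggestion', 'joke', 'funny', 'weather', 'forecast', 'temperature', 'climate'}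
--     stop_words = {'how', 'to', 'what', 'where', 'when', 'why', 'is', 'are', 'the', 'a', 'an', 'in', 'on', 'at', 'for', 'with', 'about', 'tell', 'me', 'can', 'i', 'do', 'does', 'spain', 'spanish', 'barcelona'}
--     topic_keywords = {
--         'visa': {'visa', 'tie', 'residence', 'permit', 'immigration', 'extranjeria'},
--         'work': {'work', 'job', 'employment', 'internship', 'salary'},
--         'housing': {'housing', 'apartment', 'flat', 'rent', 'empadronamiento', 'landlord'},
--         'transport': {'transport', 'metro', 'bus', 'train', 'tjove', 'ticket'},
--         'mobile': {'mobile', 'phone', 'sim', 'esim', 'vodafone', 'movistar'},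
--         'university': {'programming', 'coding', 'computer', 'science', 'capstone', 'module', 'exam', 'grade', 'professor'},
--         'life': {'language', 'school', 'course', 'food', 'restaurant', 'beach', 'discount', 'fish', 'seafood'}
--     }
--     # inverted index: keyword -> set of topic names
--     index = {}
--     for topic_name, keywords in topic_keywords.items():
--         for kw in keywords:
--             index[kw] = index.get(kw, set()) | {topic_name}
--
--     topic = matched_item.get("topic", "")
--     question_words = set(matched_item.get("question", "").lower().split())
--
--     has_common = False
--     for w in query.lower().split():
--         if w in non_kb_keywords:
--             return False
--         if w in stop_words:
--             continue
--         if w in question_words: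
--             has_common = True
--         if any(t != topic for t in index.get(w, ())):
--             return False
--     return has_common
-- ===== Notes on version B (the rewrite author's own statement) =====
-- stated objective: alternative
-- what changed: A's set-algebra pipeline (set differences, an intersection-based common-keyword count, a dead subset test, and an outer loop over the topic table intersecting the whole query-keyword set per topic) is replaced by a prebuilt inverted index keyword->set-of-topics and a single pass over the query's words that checks non-KB words, common keywords and foreign-topic keywords in one loop, dropping the provably unreachable subset-of-{spanish,barcelona,spain} branch.
import Mathlib
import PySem

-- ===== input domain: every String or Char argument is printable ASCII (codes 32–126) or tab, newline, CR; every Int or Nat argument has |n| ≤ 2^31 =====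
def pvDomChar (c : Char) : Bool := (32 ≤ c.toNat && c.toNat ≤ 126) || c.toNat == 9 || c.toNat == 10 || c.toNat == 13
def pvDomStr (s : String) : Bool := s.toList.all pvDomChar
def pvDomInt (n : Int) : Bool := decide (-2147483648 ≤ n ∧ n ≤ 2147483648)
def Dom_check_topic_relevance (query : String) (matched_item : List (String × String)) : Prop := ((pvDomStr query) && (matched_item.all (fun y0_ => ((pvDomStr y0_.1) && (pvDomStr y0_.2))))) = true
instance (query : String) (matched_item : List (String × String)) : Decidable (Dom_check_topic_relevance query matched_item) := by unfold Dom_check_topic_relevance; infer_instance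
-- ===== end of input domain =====

-- B replaces A's set-algebra pipeline (set differences, a subset test, an outer loop over the topic table
-- intersecting the whole query-keyword set per topic) by a prebuilt inverted index keyword -> set of topics
-- and ONE pass over the query's words; objective: alternative structure, same observable results.

-- shared literal constants (data only)
def pvNonKb : PySem.Set String :=
  PySem.Set.ofList ["best","top","recommend","suggestion","joke","funny","weather","forecast","temperature","climate"]
def pvStop : PySem.Set String :=
  PySem.Set.ofList ["how","to","what","where","when","why","is","are","the","a","an","in","on","at","for","with","about","tell","me","can","i","do","does","spain","spanish","barcelona"]
def pvTable : List (String × PySem.Set String) :=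
  [("visa", PySem.Set.ofList ["visa","tie","residence","permit","immigration","extranjeria"]),
   ("work", PySem.Set.ofList ["work","job","employment","internship","salary"]),
   ("housing", PySem.Set.ofList ["housing","apartment","flat","rent","empadronamiento","landlord"]),
   ("transport", PySem.Set.ofList ["transport","metro","bus","train","tjove","ticket"]),
   ("mobile", PySem.Set.ofList ["mobile","phone","sim","esim","vodafone","movistar"]),
   ("university", PySem.Set.ofList ["programming","coding","computer","science","capstone","module","exam","grade","professor"]),
   ("life", PySem.Set.ofList ["language","school","course","food","restaurant","beach","discount","fish","seafood"])]

-- ===== PORT A =====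
def pvTopicLoopA (query_keywords : PySem.Set String) (topic : String) : List (String × PySem.Set String) → Bool
  | [] => true
  | (topic_name, keywords) :: rest =>
    if PySem.Set.inter query_keywords keywords ≠ [] ∧ topic ≠ topic_name then false
    else pvTopicLoopA query_keywords topic rest

def check_topic_relevance (query : String) (matched_item : List (String × String)) : Bool :=
  let d := PySem.Dict.mk matched_item
  let query_lower := PySem.Str.lower query
  let question_lower := PySem.Str.lower (d.getD "question" "")
  let _answer_lower := PySem.Str.lower (d.getD "answer" "")
  let topic := d.getD "topic" ""
  let query_words : PySem.Set String := PySem.Set.ofList (PySem.Str.split₀ query_lower)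
  let question_words : PySem.Set String := PySem.Set.ofList (PySem.Str.split₀ question_lower)
  if PySem.Set.inter query_words pvNonKb ≠ [] then false
  else
    let query_keywords := PySem.Set.diff query_words pvStop
    let question_keywords := PySem.Set.diff question_words pvStop
    let common_keywords := PySem.Set.inter query_keywords question_keywords
    if PySem.Set.len common_keywords = 0 then false
    else if PySem.Set.issubset common_keywords (PySem.Set.ofList ["spanish","barcelona","spain"]) then false
    else pvTopicLoopA query_keywords topic pvTable

-- ===== PORT B =====
-- inverted index: keyword -> set of topic names (Source B: index[kw] = index.get(kw, set()) | {topic_name})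
def pvIndex : PySem.Dict String (PySem.Set String) :=
  pvTable.foldl
    (fun index p =>
      p.2.foldl
        (fun index kw =>
          index.insert kw (PySem.Set.union (index.getD kw PySem.Set.empty) (PySem.Set.ofList [p.1])))
        index)
    PySem.Dict.empty

def pvLoopB (topic : String) (question_words : PySem.Set String) (has_common : Bool) : List String → Bool
  | [] => has_common
  | w :: ws =>
    if PySem.Set.contains pvNonKb w then false
    else if PySem.Set.contains pvStop w then pvLoopB topic question_words has_common ws
    else
      let has_common := has_common || PySem.Set.contains question_words w
      if (pvIndex.getD w PySem.Set.empty).any (fun t => t != topic) then false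
      else pvLoopB topic question_words has_common ws

def check_topic_relevance_alt (query : String) (matched_item : List (String × String)) : Bool :=
  let d := PySem.Dict.mk matched_item
  let topic := d.getD "topic" ""
  let question_words : PySem.Set String := PySem.Set.ofList (PySem.Str.split₀ (PySem.Str.lower (d.getD "question" "")))
  pvLoopB topic question_words false (PySem.Str.split₀ (PySem.Str.lower query))

-- ===== PRECONDITION & SPEC =====
def Spec_check_topic_relevance (query : String) (matched_item : List (String × String)) (out : Bool) : Prop := out = check_topic_relevance_alt query matched_item
instance (query : String) (matched_item : List (String × String)) (out : Bool) : Decidable (Spec_check_topic_relevance query matched_item out) := by unfold Spec_check_topic_relevance; infer_instance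

-- ===== CLAIM (what is proved, stated in full; the proofs are below) =====
def Claim_equal_check_topic_relevance : Prop := ∀ (query : String) (matched_item : List (String × String)), Dom_check_topic_relevance query matched_item → Spec_check_topic_relevance query matched_item (check_topic_relevance query matched_item)

-- ===== LEMMAS AND PROOFS =====

-- abbreviations for the shared ingredients of both programs
def pvW (query : String) : List String := PySem.Str.split₀ (PySem.Str.lower query)
def pvQW (matched_item : List (String × String)) : PySem.Set String :=
  PySem.Set.ofList (PySem.Str.split₀ (PySem.Str.lower ((PySem.Dict.mk matched_item).getD "question" "")))
def pvTopicOf (matched_item : List (String × String)) : String := (PySem.Dict.mk matched_item).getD "topic" ""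

-- "some topic other than `topic` owns keyword w"
def pvBad (topic w : String) : Prop := ∃ p ∈ pvTable, w ∈ p.2 ∧ p.1 ≠ topic

lemma pv_inter_eq_nil_iff (s t : PySem.Set String) :
    PySem.Set.inter s t = [] ↔ ∀ x ∈ s, x ∉ t := by
  rw [List.eq_nil_iff_forall_not_mem]
  constructor
  · intro h x hs ht; exact h x ((PySem.Set.mem_inter s t x).2 ⟨hs, ht⟩)
  · intro h x hx
    obtain ⟨hs, ht⟩ := (PySem.Set.mem_inter s t x).1 hx
    exact h x hs ht

lemma pv_len_zero (s : PySem.Set String) : PySem.Set.len s = 0 ↔ s = [] := by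
  simp [PySem.Set.len, List.length_eq_zero_iff]

-- membership in the inverted index (inner keyword loop)
lemma pv_index_inner (n : String) (ks : List String)
    (d : PySem.Dict String (PySem.Set String)) (w t : String) :
    t ∈ (ks.foldl (fun d kw => d.insert kw (PySem.Set.union (d.getD kw PySem.Set.empty) (PySem.Set.ofList [n]))) d).getD w PySem.Set.empty
      ↔ t ∈ d.getD w PySem.Set.empty ∨ (w ∈ ks ∧ t = n) := by
  induction ks generalizing d with
  | nil => simp
  | cons kw ks ih =>
    simp only [List.foldl_cons, ih, PySem.Dict.getD_insert, List.mem_cons]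
    by_cases hw : w = kw
    · rw [if_pos hw]
      subst hw
      simp only [PySem.Set.mem_union, PySem.Set.mem_ofList, List.mem_singleton]
      tauto
    · rw [if_neg hw]
      tauto

-- membership in the inverted index (outer topic loop)
lemma pv_index_outer (tbl : List (String × PySem.Set String))
    (d : PySem.Dict String (PySem.Set String)) (w t : String) :
    t ∈ (tbl.foldl (fun d p => p.2.foldl (fun d kw => d.insert kw (PySem.Set.union (d.getD kw PySem.Set.empty) (PySem.Set.ofList [p.1]))) d) d).getD w PySem.Set.empty
      ↔ t ∈ d.getD w PySem.Set.empty ∨ ∃ p ∈ tbl, w ∈ p.2 ∧ t = p.1 := by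
  induction tbl generalizing d with
  | nil => simp
  | cons p tbl ih =>
    simp only [List.foldl_cons, ih, pv_index_inner, List.exists_mem_cons_iff]
    tauto

lemma pv_mem_index (w t : String) :
    t ∈ pvIndex.getD w PySem.Set.empty ↔ ∃ p ∈ pvTable, w ∈ p.2 ∧ t = p.1 := by
  rw [pvIndex, pv_index_outer]
  simp [PySem.Set.empty, PySem.Dict.getD_empty]

lemma pv_any_index (topic w : String) :
    ((pvIndex.getD w PySem.Set.empty).any (fun t => t != topic) = true) ↔ pvBad topic w := by
  rw [List.any_eq_true, pvBad]
  constructor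
  · rintro ⟨t, ht, hne⟩
    obtain ⟨p, hp, hwp, rfl⟩ := (pv_mem_index w t).1 ht
    exact ⟨p, hp, hwp, by simpa using hne⟩
  · rintro ⟨p, hp, hwp, hne⟩
    exact ⟨p.1, (pv_mem_index w p.1).2 ⟨p, hp, hwp, rfl⟩, by simpa using hne⟩

-- characterisation of A's topic loop
lemma pv_loopA_char (qk : PySem.Set String) (topic : String) :
    ∀ tbl, pvTopicLoopA qk topic tbl = true ↔
      ∀ p ∈ tbl, PySem.Set.inter qk p.2 ≠ [] → topic = p.1 := by
  intro tbl
  induction tbl with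
  | nil => simp [pvTopicLoopA]
  | cons p tbl ih =>
    obtain ⟨n, ks⟩ := p
    by_cases h : PySem.Set.inter qk ks ≠ [] ∧ topic ≠ n
    · simp only [pvTopicLoopA, if_pos h, Bool.false_eq_true, false_iff, List.forall_mem_cons]
      exact fun hall => h.2 (hall.1 h.1)
    · simp only [pvTopicLoopA, if_neg h, ih, List.forall_mem_cons]
      push Not at h
      tauto

-- characterisation of B's single pass over the query words
lemma pv_loopB_char (topic : String) (qws : PySem.Set String) :
    ∀ (ws : List String) (hc : Bool),
      pvLoopB topic qws hc ws = true ↔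
        ((∀ w ∈ ws, w ∉ pvNonKb ∧ (w ∉ pvStop → ¬ pvBad topic w)) ∧
          (hc = true ∨ ∃ w ∈ ws, w ∉ pvStop ∧ w ∈ qws)) := by
  intro ws
  induction ws with
  | nil => intro hc; simp [pvLoopB]
  | cons w ws ih =>
    intro hc
    by_cases hn : w ∈ pvNonKb
    · have h : PySem.Set.contains pvNonKb w = true := (PySem.Set.contains_iff _ _).2 hn
      simp only [pvLoopB, h, if_true, Bool.false_eq_true, false_iff, List.forall_mem_cons]
      rintro ⟨⟨⟨hw, -⟩, -⟩, -⟩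
      exact hw hn
    · have h : PySem.Set.contains pvNonKb w = false := by
        cases hcon : PySem.Set.contains pvNonKb w
        · rfl
        · exact absurd ((PySem.Set.contains_iff _ _).1 hcon) hn
      by_cases hs : w ∈ pvStop
      · have h2 : PySem.Set.contains pvStop w = true := (PySem.Set.contains_iff _ _).2 hs
        simp only [pvLoopB, h, h2, Bool.false_eq_true, if_false, if_true, ih,
          List.forall_mem_cons, List.exists_mem_cons_iff]
        constructor
        · rintro ⟨hall, hcm⟩
          refine ⟨⟨⟨hn, fun hws => absurd hs hws⟩, hall⟩, ?_⟩
          rcases hcm with hh | hh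
          · exact Or.inl hh
          · exact Or.inr (Or.inr hh)
        · rintro ⟨⟨-, hall⟩, hcm⟩
          refine ⟨hall, ?_⟩
          rcases hcm with hh | hh | hh
          · exact Or.inl hh
          · exact absurd hs hh.1
          · exact Or.inr hh
      · have h2 : PySem.Set.contains pvStop w = false := by
          cases hcon : PySem.Set.contains pvStop w
          · rfl
          · exact absurd ((PySem.Set.contains_iff _ _).1 hcon) hs
        by_cases hb : pvBad topic w
        · have h3 : (pvIndex.getD w PySem.Set.empty).any (fun t => t != topic) = true :=
            (pv_any_index topic w).2 hb
          simp only [pvLoopB, h, h2, h3, Bool.false_eq_true, if_false, if_true,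
            false_iff, List.forall_mem_cons]
          rintro ⟨⟨⟨-, hbad⟩, -⟩, -⟩
          exact hbad hs hb
        · have h3 : (pvIndex.getD w PySem.Set.empty).any (fun t => t != topic) = false := by
            cases hcon : (pvIndex.getD w PySem.Set.empty).any (fun t => t != topic)
            · rfl
            · exact absurd ((pv_any_index topic w).1 hcon) hb
          simp only [pvLoopB, h, h2, h3, Bool.false_eq_true, if_false, ih,
            Bool.or_eq_true_iff, PySem.Set.contains_iff,
            List.forall_mem_cons, List.exists_mem_cons_iff]
          constructor
          · rintro ⟨hall, hcm⟩
            refine ⟨⟨⟨hn, fun _ => hb⟩, hall⟩, ?_⟩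
            rcases hcm with (hh | hh) | hh
            · exact Or.inl hh
            · exact Or.inr (Or.inl ⟨hs, hh⟩)
            · exact Or.inr (Or.inr hh)
          · rintro ⟨⟨-, hall⟩, hcm⟩
            refine ⟨hall, ?_⟩
            rcases hcm with hh | ⟨-, hh⟩ | hh
            · exact Or.inl (Or.inl hh)
            · exact Or.inl (Or.inr hh)
            · exact Or.inr hh

-- membership in A's common_keywords set
lemma pv_mem_common (query : String) (matched_item : List (String × String)) (x : String) :
    x ∈ PySem.Set.inter (PySem.Set.diff (PySem.Set.ofList (pvW query)) pvStop)
          (PySem.Set.diff (pvQW matched_item) pvStop)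
      ↔ x ∈ pvW query ∧ x ∉ pvStop ∧ x ∈ pvQW matched_item := by
  rw [PySem.Set.mem_inter, PySem.Set.mem_diff, PySem.Set.mem_diff, PySem.Set.mem_ofList]
  exact ⟨fun ⟨⟨a, b⟩, ⟨c, _⟩⟩ => ⟨a, b, c⟩, fun ⟨a, b, c⟩ => ⟨⟨a, b⟩, ⟨c, b⟩⟩⟩

lemma pv_lemA (query : String) (matched_item : List (String × String)) :
    check_topic_relevance query matched_item = true ↔
      ((∀ w ∈ pvW query, w ∉ pvNonKb) ∧
        (∃ w ∈ pvW query, w ∉ pvStop ∧ w ∈ pvQW matched_item) ∧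
        (∀ w ∈ pvW query, w ∉ pvStop → ¬ pvBad (pvTopicOf matched_item) w)) := by
  simp only [check_topic_relevance]
  split_ifs with h1 h2 h3
  · -- a non-KB keyword occurs in the query
    rw [Ne, pv_inter_eq_nil_iff] at h1
    push Not at h1
    obtain ⟨x, hxs, hxt⟩ := h1
    simp only [false_iff]
    rintro ⟨hno, -, -⟩
    exact hno x ((PySem.Set.mem_ofList _ _).1 hxs) hxt
  · -- no common keywords
    have hnil : PySem.Set.inter (PySem.Set.diff (PySem.Set.ofList (pvW query)) pvStop)
        (PySem.Set.diff (pvQW matched_item) pvStop) = [] := (pv_len_zero _).1 h2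
    simp only [false_iff]
    rintro ⟨-, ⟨w, hw, hws, hwq⟩, -⟩
    have hm := (pv_mem_common query matched_item w).2 ⟨hw, hws, hwq⟩
    rw [hnil] at hm
    cases hm
  · -- subset-of-location-words branch is unreachable when common is nonempty
    exfalso
    have hnil : ¬ (PySem.Set.inter (PySem.Set.diff (PySem.Set.ofList (pvW query)) pvStop)
        (PySem.Set.diff (pvQW matched_item) pvStop) = []) := fun hn => h2 ((pv_len_zero _).2 hn)
    obtain ⟨w, hw⟩ := List.exists_mem_of_ne_nil _ hnil
    have hw' := (pv_mem_common query matched_item w).1 hw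
    have hsb : w ∈ PySem.Set.ofList ["spanish","barcelona","spain"] :=
      (PySem.Set.issubset_iff _ _).1 h3 w hw
    have hstop : w ∈ pvStop := by
      have hsub : ∀ x ∈ PySem.Set.ofList ["spanish","barcelona","spain"], x ∈ pvStop := by decide
      exact hsub w hsb
    exact hw'.2.1 hstop
  · -- main branch: the topic loop
    rw [not_not, pv_inter_eq_nil_iff] at h1
    have hP2 : ∃ w ∈ pvW query, w ∉ pvStop ∧ w ∈ pvQW matched_item := by
      have hnil : ¬ (PySem.Set.inter (PySem.Set.diff (PySem.Set.ofList (pvW query)) pvStop)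
          (PySem.Set.diff (pvQW matched_item) pvStop) = []) := fun hn => h2 ((pv_len_zero _).2 hn)
      obtain ⟨w, hw⟩ := List.exists_mem_of_ne_nil _ hnil
      have hw' := (pv_mem_common query matched_item w).1 hw
      exact ⟨w, hw'.1, hw'.2.1, hw'.2.2⟩
    rw [pv_loopA_char]
    constructor
    · intro hall
      refine ⟨fun w hw hwn => h1 w ((PySem.Set.mem_ofList _ _).2 hw) hwn, hP2, ?_⟩
      rintro w hw hws ⟨p, hp, hwp, hpt⟩
      refine hpt (hall p hp ?_).symm
      intro hnil
      rw [pv_inter_eq_nil_iff] at hnil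
      exact hnil w ((PySem.Set.mem_diff _ _ _).2 ⟨(PySem.Set.mem_ofList _ _).2 hw, hws⟩) hwp
    · rintro ⟨-, -, hP3⟩ p hp hne
      by_contra hpt
      rw [Ne, pv_inter_eq_nil_iff] at hne
      push Not at hne
      obtain ⟨w, hwqk, hwp⟩ := hne
      obtain ⟨hwW, hws⟩ := (PySem.Set.mem_diff _ _ _).1 hwqk
      exact hP3 w ((PySem.Set.mem_ofList _ _).1 hwW) hws ⟨p, hp, hwp, fun h => hpt h.symm⟩

lemma pv_lemB (query : String) (matched_item : List (String × String)) :
    check_topic_relevance_alt query matched_item = true ↔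
      ((∀ w ∈ pvW query, w ∉ pvNonKb) ∧
        (∃ w ∈ pvW query, w ∉ pvStop ∧ w ∈ pvQW matched_item) ∧
        (∀ w ∈ pvW query, w ∉ pvStop → ¬ pvBad (pvTopicOf matched_item) w)) := by
  simp only [check_topic_relevance_alt]
  rw [pv_loopB_char]
  simp only [Bool.false_eq_true, false_or]
  constructor
  · rintro ⟨hall, hcm⟩
    exact ⟨fun w hw => (hall w hw).1, hcm, fun w hw => (hall w hw).2⟩
  · rintro ⟨h1, h2, h3⟩
    exact ⟨fun w hw => ⟨h1 w hw, h3 w hw⟩, h2⟩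

-- ===== VERDICT (by name: the statement is the Claim_ definition above) =====
theorem check_topic_relevance_spec : Claim_equal_check_topic_relevance := by
  intro query matched_item _
  unfold Spec_check_topic_relevance
  have h := (pv_lemA query matched_item).trans (pv_lemB query matched_item).symm
  cases ha : check_topic_relevance query matched_item <;>
    cases hb : check_topic_relevance_alt query matched_item <;> simp_all
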